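-- pv_equiv track=rewrite | github.com/iescriche/App_optimizador_rutas | optimizador_rutas_coste.py | recompute_etas
-- ===== SOURCE A (Python) =====
-- def recompute_etas(routes, time_m, start_min, service_time, n):
--     eta = [None] * n
--     for r in routes:
--         if len(r) <= 2:
--             continue
--         t = start_min
--         eta[r[0]] = t
--         for i in range(1, len(r) - 1):
--             prev, node = r[i - 1], r[i]
--             t += time_m[prev][node] + service_time
--             eta[node] = t
--         t += time_m[r[-2]][r[-1]]
--         eta[r[-1]] = t
--     return eta
-- ===== SOURCE B (Python) =====
-- def recompute_etas(routes, time_m, start_min, service_time, n):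
--     eta = [None] * n
--     for r in routes:
--         if len(r) <= 2:
--             continue
--         legs = list(zip(r, r[1:]))
--         incs = [time_m[a][b] + service_time for a, b in legs[:len(legs) - 1]]
--         incs.append(time_m[legs[-1][0]][legs[-1][1]])
--         times = [start_min]
--         for inc in incs:
--             times.append(times[-1] + inc)
--         for node, t in zip(r, times):
--             eta[node] = t
--     return eta
-- ===== Notes on version B (the rewrite author's own statement) =====
-- stated objective: alternative
-- what changed: A interleaves a single running-total index loop that writes eta as it goes; B decomposes the work per route into building a per-leg increment list (service time folded into each intermediate leg), a separate prefix-sum pass, and a final zip assignment of nodes to cumulative times.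
import Mathlib
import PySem

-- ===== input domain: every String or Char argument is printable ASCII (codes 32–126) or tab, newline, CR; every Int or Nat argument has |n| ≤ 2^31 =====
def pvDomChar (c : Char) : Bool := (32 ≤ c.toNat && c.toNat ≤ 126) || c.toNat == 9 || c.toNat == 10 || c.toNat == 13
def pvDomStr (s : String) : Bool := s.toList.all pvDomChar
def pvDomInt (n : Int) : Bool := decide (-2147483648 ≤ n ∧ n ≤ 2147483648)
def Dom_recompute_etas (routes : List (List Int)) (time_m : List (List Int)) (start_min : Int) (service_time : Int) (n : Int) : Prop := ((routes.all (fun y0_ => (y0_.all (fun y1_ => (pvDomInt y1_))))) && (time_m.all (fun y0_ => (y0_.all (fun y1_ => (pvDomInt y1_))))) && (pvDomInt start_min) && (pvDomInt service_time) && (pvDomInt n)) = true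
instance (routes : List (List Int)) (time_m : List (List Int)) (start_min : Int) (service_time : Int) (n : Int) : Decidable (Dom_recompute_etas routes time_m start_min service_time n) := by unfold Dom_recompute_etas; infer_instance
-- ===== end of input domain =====

-- B replaces A's running-total index loop by a build-then-accumulate decomposition
-- (per-leg increments with service time folded in, a prefix-sum pass, a zip assignment);
-- objective: alternative (same cost, different structure).

-- ===== PORT A =====
-- literal port of A: [None]*n; for each route of length > 2 a running total t, eta[r[0]] = start_min,
-- an index loop over range(1, len(r)-1), and a final leg r[-2]->r[-1] without service time.
-- Indexing uses the total pyGetD/pySetD forms; Pre_ below excludes exactly the IndexError inputs.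
def recompute_etas (routes : List (List Int)) (time_m : List (List Int)) (start_min : Int) (service_time : Int) (n : Int) : List (Option Int) :=
  routes.foldl (fun eta r =>
    if r.length ≤ 2 then eta
    else
      let t := start_min
      let eta := PySem.List.pySetD eta (PySem.List.pyGetD r 0 0) (some t)
      let p := (PySem.List.pyRange 1 ((r.length : Int) - 1) 1).foldl
        (fun (s : Int × List (Option Int)) i =>
          let prev := PySem.List.pyGetD r (i - 1) 0
          let node := PySem.List.pyGetD r i 0
          let t := s.1 + PySem.List.pyGetD (PySem.List.pyGetD time_m prev []) node 0 + service_time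
          (t, PySem.List.pySetD s.2 node (some t)))
        (t, eta)
      let t := p.1 + PySem.List.pyGetD (PySem.List.pyGetD time_m (PySem.List.pyGetD r (-2) 0) []) (PySem.List.pyGetD r (-1) 0) 0
      PySem.List.pySetD p.2 (PySem.List.pyGetD r (-1) 0) (some t))
    (List.replicate n.toNat (none : Option Int))

-- ===== PORT B =====
-- literal port of B (Source B): legs = zip(r, r[1:]); increments per leg (service time folded into
-- the intermediate legs, last leg bare); a prefix-sum pass times; then assign over zip(r, times).
def recompute_etas_alt (routes : List (List Int)) (time_m : List (List Int)) (start_min : Int) (service_time : Int) (n : Int) : List (Option Int) :=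
  routes.foldl (fun eta r =>
    if r.length ≤ 2 then eta
    else
      let legs := List.zip r (PySem.List.slice r (some 1) none)
      let incs := (PySem.List.slice legs none (some ((legs.length : Int) - 1))).map
        (fun ab => PySem.List.pyGetD (PySem.List.pyGetD time_m ab.1 []) ab.2 0 + service_time)
      let lastLeg := PySem.List.pyGetD legs (-1) (0, 0)
      let incs2 := incs ++ [PySem.List.pyGetD (PySem.List.pyGetD time_m lastLeg.1 []) lastLeg.2 0]
      let times := incs2.foldl (fun ts inc => ts ++ [PySem.List.pyGetD ts (-1) 0 + inc]) [start_min]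
      (List.zip r times).foldl (fun e nt => PySem.List.pySetD e nt.1 (some nt.2)) eta)
    (List.replicate n.toNat (none : Option Int))

-- ===== PRECONDITION & SPEC =====
-- Pre_ excludes exactly the inputs on which the Python A raises an IndexError: a node of a
-- processed route out of range for eta (length max(n,0)) or a consecutive pair of such a route
-- out of range for time_m / its row.
def Pre_recompute_etas (routes : List (List Int)) (time_m : List (List Int)) (start_min : Int) (service_time : Int) (n : Int) : Prop :=
  ∀ r ∈ routes, 2 < r.length →
    (∀ v ∈ r, PySem.Raise.InRange n.toNat v) ∧
    (∀ p ∈ List.zip r r.tail, PySem.Raise.InRange time_m.length p.1 ∧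
        PySem.Raise.InRange (PySem.List.pyGetD time_m p.1 []).length p.2)
instance (routes : List (List Int)) (time_m : List (List Int)) (start_min : Int) (service_time : Int) (n : Int) : Decidable (Pre_recompute_etas routes time_m start_min service_time n) := by unfold Pre_recompute_etas; infer_instance

def pvWitness_recompute_etas : List (List Int) × List (List Int) × Int × Int × Int :=
  ([[0, 1, 2], [3, 4]], [[1, 2, 3], [4, 5, 6], [7, 8, 9]], 480, 5, 5)

def Spec_recompute_etas (routes : List (List Int)) (time_m : List (List Int)) (start_min : Int) (service_time : Int) (n : Int) (out : List (Option Int)) : Prop := out = recompute_etas_alt routes time_m start_min service_time n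
instance (routes : List (List Int)) (time_m : List (List Int)) (start_min : Int) (service_time : Int) (n : Int) (out : List (Option Int)) : Decidable (Spec_recompute_etas routes time_m start_min service_time n out) := by unfold Spec_recompute_etas; infer_instance

-- ===== CLAIM (what is proved, stated in full; the proofs are below) =====
def Claim_equal_recompute_etas : Prop := ∀ (routes : List (List Int)) (time_m : List (List Int)) (start_min : Int) (service_time : Int) (n : Int), Dom_recompute_etas routes time_m start_min service_time n → Pre_recompute_etas routes time_m start_min service_time n → Spec_recompute_etas routes time_m start_min service_time n (recompute_etas routes time_m start_min service_time n)

-- ===== LEMMAS AND PROOFS =====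

-- travel time time_m[a][b] as both ports read it
def pvW (time_m : List (List Int)) (a b : Int) : Int :=
  PySem.List.pyGetD (PySem.List.pyGetD time_m a []) b 0

-- reference walk over the consecutive legs of a route: intermediate legs add the service
-- time, the last leg does not; each arrival is written at the leg's destination.
def pvRef (time_m : List (List Int)) (st : Int) (eta : List (Option Int)) (t : Int) :
    List (Int × Int) → List (Option Int)
  | [] => eta
  | [(a, b)] => PySem.List.pySetD eta b (some (t + pvW time_m a b))
  | (a, b) :: q :: qs =>
      pvRef time_m st (PySem.List.pySetD eta b (some (t + pvW time_m a b + st)))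
        (t + pvW time_m a b + st) (q :: qs)

-- prefix sums as B's times loop builds them (after the initial [start_min])
def pvTimes : List Int → Int → List Int
  | [], _ => []
  | i :: is, t => (t + i) :: pvTimes is (t + i)

lemma pvGetD_cons_of_one_le {α : Type} (x : α) (xs : List α) (j : Int) (d : α) (h : 1 ≤ j) :
    PySem.List.pyGetD (x :: xs) j d = PySem.List.pyGetD xs (j - 1) d := by
  obtain ⟨m, rfl⟩ : ∃ m : Nat, j = (m : Int) + 1 := ⟨(j - 1).toNat, by omega⟩
  simp [PySem.List.pyGetD, PySem.List.pyGet?_cons_succ]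

lemma pvLast {α : Type} (x : α) (xs : List α) (d : α) (h : 2 ≤ xs.length) :
    PySem.List.pyGetD (x :: xs) (-1) d = PySem.List.pyGetD xs (-1) d := by
  rw [PySem.List.pyGetD_neg_ofNat _ 1 d (by omega) (by simp),
      PySem.List.pyGetD_neg_ofNat _ 1 d (by omega) (by omega)]
  simp [List.getElem_cons, show xs.length ≠ 0 by omega]

lemma pvPenult {α : Type} (x : α) (xs : List α) (d : α) (h : 2 ≤ xs.length) :
    PySem.List.pyGetD (x :: xs) (-2) d = PySem.List.pyGetD xs (-2) d := by
  rw [PySem.List.pyGetD_neg_ofNat _ 2 d (by omega) (by simp; omega),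
      PySem.List.pyGetD_neg_ofNat _ 2 d (by omega) (by omega)]
  simp [List.getElem_cons, show xs.length - 1 ≠ 0 by omega,
        show xs.length - 1 - 1 = xs.length - 2 from by omega]

lemma pvNegOne {α : Type} (xs : List α) (d : α) (h : xs ≠ []) :
    PySem.List.pyGetD xs (-1) d = xs.getLastD d := by
  rw [PySem.List.pyGetD_neg_ofNat xs 1 d (by omega)
      (by cases xs with | nil => exact absurd rfl h | cons a l => simp)]
  rw [List.getLastD_eq_getLast?, List.getLast?_eq_some_getLast h, Option.getD_some]
  exact (List.getLast_eq_getElem h).symm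

-- reindexing: the same indexed loop body over x :: r', started two further right
lemma pvShift {σ : Type} (F : σ → Int → Int → σ) (x : Int) (r' : List Int)
    (a b : Int) (s : σ) (ha : 2 ≤ a) :
    (PySem.List.pyRange a b 1).foldl
        (fun s i => F s (PySem.List.pyGetD (x :: r') (i - 1) 0) (PySem.List.pyGetD (x :: r') i 0)) s
    = (PySem.List.pyRange (a - 1) (b - 1) 1).foldl
        (fun s i => F s (PySem.List.pyGetD r' (i - 1) 0) (PySem.List.pyGetD r' i 0)) s := by
  rw [PySem.List.pyRange_one a b, PySem.List.pyRange_one (a - 1) (b - 1)]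
  have hd : b - 1 - (a - 1) = b - a := by omega
  rw [hd, List.foldl_map, List.foldl_map]
  apply PySem.List.foldl_congr_mem
  intro acc k hk
  rw [pvGetD_cons_of_one_le _ _ _ _ (by omega), pvGetD_cons_of_one_le _ _ _ _ (by omega)]
  congr 2 <;> omega

-- A's per-route body (from the state after eta[r[0]] = t) is the reference walk
lemma pvStepA (time_m : List (List Int)) (st : Int) :
    ∀ (tl : List Int), tl ≠ [] → ∀ (x y t : Int) (eta : List (Option Int)),
    (let r := x :: y :: tl
     let p := (PySem.List.pyRange 1 ((r.length : Int) - 1) 1).foldl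
        (fun (s : Int × List (Option Int)) i =>
          (s.1 + pvW time_m (PySem.List.pyGetD r (i - 1) 0) (PySem.List.pyGetD r i 0) + st,
           PySem.List.pySetD s.2 (PySem.List.pyGetD r i 0)
             (some (s.1 + pvW time_m (PySem.List.pyGetD r (i - 1) 0) (PySem.List.pyGetD r i 0) + st))))
        (t, eta)
     PySem.List.pySetD p.2 (PySem.List.pyGetD r (-1) 0)
       (some (p.1 + pvW time_m (PySem.List.pyGetD r (-2) 0) (PySem.List.pyGetD r (-1) 0))))
    = pvRef time_m st eta t (List.zip (x :: y :: tl) (y :: tl)) := by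
  intro tl
  induction tl with
  | nil => intro h; exact absurd rfl h
  | cons z tl' ih =>
    intro _ x y t eta
    by_cases h0 : tl' = []
    · subst h0
      show PySem.List.pySetD _ _ _ = _
      have hr : PySem.List.pyRange 1 (((x :: y :: [z]).length : Int) - 1) 1 = [1] := by
        norm_num [PySem.List.pyRange_one]
      rw [hr]
      simp only [List.foldl_cons, List.foldl_nil, List.zip_cons_cons, List.zip_nil_right]
      norm_num [PySem.List.pyGetD, PySem.List.pyGet?, PySem.List.pyIdx?, Int.toNat, pvRef]
    · -- step: r = x :: y :: z :: tl', tl' ≠ []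
      show PySem.List.pySetD _ _ _ = _
      have htl : 1 ≤ tl'.length := List.length_pos_of_ne_nil h0
      have hcons : PySem.List.pyRange 1 (((x :: y :: z :: tl').length : Int) - 1) 1
          = 1 :: PySem.List.pyRange 2 (((x :: y :: z :: tl').length : Int) - 1) 1 := by
        rw [PySem.List.pyRange_one_cons (by push_cast [List.length_cons]; omega)]
        norm_num
      rw [hcons]
      simp only [List.foldl_cons]
      rw [show (1:Int) - 1 = 0 from rfl]
      rw [PySem.List.pyGetD_zero_cons]
      rw [pvGetD_cons_of_one_le _ _ 1 _ le_rfl, show (1:Int) - 1 = 0 from rfl,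
          PySem.List.pyGetD_zero_cons]
      have h2 := pvShift
        (fun (s : Int × List (Option Int)) prev node =>
          (s.1 + pvW time_m prev node + st,
           PySem.List.pySetD s.2 node (some (s.1 + pvW time_m prev node + st))))
        x (y :: z :: tl') 2 (((x :: y :: z :: tl').length : Int) - 1)
        (t + pvW time_m x y + st, PySem.List.pySetD eta y (some (t + pvW time_m x y + st))) le_rfl
      simp only [] at h2
      rw [h2]
      rw [pvLast x _ _ (by simp), pvPenult x _ _ (by simp)]
      have harg : ((x :: y :: z :: tl').length : Int) - 1 - 1 = ((y :: z :: tl').length : Int) - 1 := by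
        push_cast [List.length_cons]; omega
      rw [show (2:Int) - 1 = 1 from rfl, harg]
      refine Eq.trans (ih h0 y z (t + pvW time_m x y + st)
        (PySem.List.pySetD eta y (some (t + pvW time_m x y + st)))) ?_
      rw [List.zip_cons_cons, List.zip_cons_cons]
      rfl

-- B's times loop is the initial list followed by the prefix sums
lemma pvScan : ∀ (incs acc : List Int), acc ≠ [] →
    incs.foldl (fun ts inc => ts ++ [PySem.List.pyGetD ts (-1) 0 + inc]) acc
    = acc ++ pvTimes incs (acc.getLastD 0) := by
  intro incs
  induction incs with
  | nil => intro acc h; simp [pvTimes]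
  | cons i is ih =>
    intro acc h
    simp only [List.foldl_cons]
    rw [pvNegOne acc 0 h]
    rw [ih (acc ++ [acc.getLastD 0 + i]) (by simp)]
    have hgl : (acc ++ [acc.getLastD 0 + i]).getLastD 0 = acc.getLastD 0 + i := by simp
    rw [hgl]
    simp [pvTimes]

-- B's assignment pass over the destinations and the prefix sums is the reference walk
lemma pvStepC (time_m : List (List Int)) (st : Int) :
    ∀ (pairs : List (Int × Int)), pairs ≠ [] → ∀ (t : Int) (eta : List (Option Int)),
    (List.zip (pairs.map Prod.snd)
        (pvTimes (pairs.dropLast.map (fun ab => pvW time_m ab.1 ab.2 + st)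
                  ++ [pvW time_m (pairs.getLastD (0, 0)).1 (pairs.getLastD (0, 0)).2]) t)).foldl
      (fun e nt => PySem.List.pySetD e nt.1 (some nt.2)) eta
    = pvRef time_m st eta t pairs := by
  intro pairs
  induction pairs with
  | nil => intro h; exact absurd rfl h
  | cons ab qs ih =>
    intro h t eta
    match qs, ih with
    | [], _ =>
      obtain ⟨a, b⟩ := ab
      simp [pvTimes, pvRef]
    | q :: qs', ih =>
      obtain ⟨a, b⟩ := ab
      have hlast : ((a, b) :: q :: qs').getLastD (0, 0) = (q :: qs').getLastD (0, 0) := by simp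
      simp only [hlast, List.dropLast_cons₂, List.map_cons, List.cons_append]
      rw [pvTimes]
      simp only [List.zip_cons_cons, List.foldl_cons]
      have hih := ih (by simp) (t + (pvW time_m a b + st))
        (PySem.List.pySetD eta b (some (t + (pvW time_m a b + st))))
      simp only [List.map_cons] at hih
      rw [hih]
      conv_rhs => rw [pvRef]
      ring_nf

-- B's per-route body is the reference walk from eta[r[0]] = t
lemma pvStepB (time_m : List (List Int)) (st t : Int) :
    ∀ (tl : List Int), ∀ (x y : Int) (eta : List (Option Int)),
    (let r := x :: y :: tl
     let legs := List.zip r (PySem.List.slice r (some 1) none)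
     let incs := (PySem.List.slice legs none (some ((legs.length : Int) - 1))).map
        (fun ab => pvW time_m ab.1 ab.2 + st)
     let lastLeg := PySem.List.pyGetD legs (-1) (0, 0)
     let incs2 := incs ++ [pvW time_m lastLeg.1 lastLeg.2]
     let times := incs2.foldl (fun ts inc => ts ++ [PySem.List.pyGetD ts (-1) 0 + inc]) [t]
     (List.zip r times).foldl (fun e nt => PySem.List.pySetD e nt.1 (some nt.2)) eta)
    = pvRef time_m st (PySem.List.pySetD eta x t) t (List.zip (x :: y :: tl) (y :: tl)) := by
  intro tl x y eta
  show (List.zip _ _).foldl _ _ = _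
  rw [PySem.List.slice_from_one]
  simp only [List.tail_cons]
  have hne : List.zip (x :: y :: tl) (y :: tl) ≠ [] := by simp
  have hcast : ((List.zip (x :: y :: tl) (y :: tl)).length : Int) - 1
      = (((List.zip (x :: y :: tl) (y :: tl)).length - 1 : Nat) : Int) := by
    have : 1 ≤ (List.zip (x :: y :: tl) (y :: tl)).length := by simp [List.length_zip]
    omega
  rw [hcast, PySem.List.slice_to_natCast, ← List.dropLast_eq_take]
  rw [pvNegOne _ _ hne]
  rw [pvScan _ [t] (by simp)]
  simp only [List.cons_append, List.nil_append, List.getLastD_cons, List.getLastD_nil]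
  rw [List.zip_cons_cons, List.foldl_cons]
  have hsnd : (y :: tl) = (List.zip (x :: y :: tl) (y :: tl)).map Prod.snd :=
    (List.map_snd_zip (by simp)).symm
  have hC := pvStepC time_m st _ hne t (PySem.List.pySetD eta x (some t))
  rw [← hsnd] at hC
  exact hC

-- ===== VERDICT (by name: the statement is the Claim_ definition above) =====
theorem recompute_etas_spec : Claim_equal_recompute_etas := by
  intro routes time_m start_min service_time n _ _
  unfold Spec_recompute_etas recompute_etas recompute_etas_alt
  apply PySem.List.foldl_congr_mem
  intro eta r _
  by_cases hlen : r.length ≤ 2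
  · simp only [if_pos hlen]
  · simp only [if_neg hlen]
    match r, hlen with
    | [], h => exact absurd (by simp) h
    | [x], h => exact absurd (by simp) h
    | [x, y], h => exact absurd (by simp) h
    | x :: y :: z :: tl, _ =>
      rw [PySem.List.pyGetD_zero_cons]
      exact (pvStepA time_m service_time (z :: tl) (by simp) x y start_min
          (PySem.List.pySetD eta x (some start_min))).trans
        (pvStepB time_m service_time start_min (z :: tl) x y eta).symm
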